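-- pv_equiv track=rewrite | github.com/Golenspade/self-offset-reasoning-training | logic_utils.py | find_main_implication
-- ===== SOURCE A (Python) =====
-- def find_main_implication(formula: str) -> tuple:
--     """
--     找到命题中的主蕴含符 ->
--     返回 (antecedent, consequent) 或 (None, None) 如果不是蕴含命题
--
--     这个函数能正确处理嵌套的括号和多层蕴含
--     """
--     formula = formula.strip()
--
--     # 如果不包含 ->，不是蕴含命题
--     if "->" not in formula:
--         return None, None
--
--     # 使用栈来跟踪括号层级
--     paren_depth = 0
--     i = 0
--
--     while i < len(formula) - 1:
--         char = formula[i]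
--
--         if char == "(":
--             paren_depth += 1
--         elif char == ")":
--             paren_depth -= 1
--         elif char == "-" and i + 1 < len(formula) and formula[i + 1] == ">":
--             # 找到 -> 符号
--             if paren_depth == 0:
--                 # 这是主层级的蕴含符
--                 antecedent = formula[:i].strip()
--                 consequent = formula[i + 2 :].strip()
--                 return antecedent, consequent
--
--         i += 1
--
--     # 如果没有找到主层级的 ->，返回 None
--     return None, None
-- ===== SOURCE B (Python) =====
-- def find_main_implication(formula: str) -> tuple:
--     formula = formula.strip()
--     if "->" not in formula:
--         return None, None
--     pieces = formula.split("->")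
--     depth = 0
--     for j in range(len(pieces) - 1):
--         depth += pieces[j].count("(") - pieces[j].count(")")
--         if depth == 0:
--             return "->".join(pieces[: j + 1]).strip(), "->".join(pieces[j + 1 :]).strip()
--     return None, None
-- ===== Notes on version B (the rewrite author's own statement) =====
-- stated objective: alternative
-- what changed: B replaces A's index-based character-by-character scan (with explicit lookahead for '>') by splitting the formula on '->' once and walking the piece boundaries with a running parenthesis balance, joining the pieces back at the first depth-0 boundary.
import Mathlib
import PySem

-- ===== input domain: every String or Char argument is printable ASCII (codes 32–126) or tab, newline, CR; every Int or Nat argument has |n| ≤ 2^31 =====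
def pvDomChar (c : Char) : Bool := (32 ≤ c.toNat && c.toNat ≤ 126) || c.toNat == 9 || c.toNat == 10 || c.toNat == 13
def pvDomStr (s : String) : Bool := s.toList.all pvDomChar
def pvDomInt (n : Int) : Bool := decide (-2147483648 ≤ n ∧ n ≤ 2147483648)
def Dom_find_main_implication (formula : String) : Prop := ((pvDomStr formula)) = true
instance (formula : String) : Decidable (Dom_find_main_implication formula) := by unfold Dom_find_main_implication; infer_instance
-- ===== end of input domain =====

-- B finds the main '->' by splitting on '->' once and scanning the piece boundaries with a
-- running parenthesis balance, instead of A's index-based character-by-character scan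
-- (alternative decomposition, same asymptotic cost); return values are proved equal on all inputs.

-- ===== PORT A =====
-- A's while loop over index i carrying paren_depth, ported as structural recursion over the
-- remaining suffix (the two-element pattern is "i < len(formula) - 1" with lookahead at i+1);
-- `pre` is the consumed prefix formula[:i], so `rest` is formula[i+2:] at a match.
def pvLoopA (pre : List Char) (depth : Int) : List Char → Option (List Char × List Char)
  | c :: d :: rest =>
    if c = '(' then pvLoopA (pre ++ [c]) (depth + 1) (d :: rest)
    else if c = ')' then pvLoopA (pre ++ [c]) (depth - 1) (d :: rest)
    else if c = '-' ∧ d = '>' then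
      if depth = 0 then some (pre, rest)
      else pvLoopA (pre ++ [c]) depth (d :: rest)
    else pvLoopA (pre ++ [c]) depth (d :: rest)
  | _ => none

def find_main_implication (formula : String) : Option String × Option String :=
  let f := PySem.Chars.strip formula.toList
  if PySem.Chars.isIn ['-', '>'] f = false then (none, none)
  else
    match pvLoopA [] 0 f with
    | some (a, c) =>
        (some (String.ofList (PySem.Chars.strip a)), some (String.ofList (PySem.Chars.strip c)))
    | none => (none, none)

-- ===== PORT B =====
-- B's `for j in range(len(pieces) - 1)` over the split pieces, ported as structural recursion
-- over the pieces still ahead; `acc` holds pieces[:j], so pieces[:j+1] = acc ++ [p].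
def pvLoopB (acc : List (List Char)) (depth : Int) : List (List Char) → Option String × Option String
  | p :: q :: rest =>
    let depth' := depth + (PySem.Chars.count p ['('] : Int) - (PySem.Chars.count p [')'] : Int)
    if depth' = 0 then
      (some (String.ofList (PySem.Chars.strip (PySem.Chars.join ['-', '>'] (acc ++ [p])))),
       some (String.ofList (PySem.Chars.strip (PySem.Chars.join ['-', '>'] (q :: rest)))))
    else pvLoopB (acc ++ [p]) depth' (q :: rest)
  | _ => (none, none)

def find_main_implication_alt (formula : String) : Option String × Option String :=
  let f := PySem.Chars.strip formula.toList
  if PySem.Chars.isIn ['-', '>'] f = false then (none, none)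
  else pvLoopB [] 0 (PySem.Chars.splitOn f ['-', '>'])

-- ===== PRECONDITION & SPEC =====
def Spec_find_main_implication (formula : String) (out : Option String × Option String) : Prop := out = find_main_implication_alt formula
instance (formula : String) (out : Option String × Option String) : Decidable (Spec_find_main_implication formula out) := by unfold Spec_find_main_implication; infer_instance

-- ===== CLAIM (what is proved, stated in full; the proofs are below) =====
def Claim_equal_find_main_implication : Prop := ∀ (formula : String), Dom_find_main_implication formula → Spec_find_main_implication formula (find_main_implication formula)

-- ===== LEMMAS AND PROOFS =====

-- reference splitter: what PySem.Chars.splitOn computes for sep = "->", fuel removed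
def pvSplit : List Char → List (List Char)
  | [] => [[]]
  | c :: rest =>
    if List.isPrefixOf ['-', '>'] (c :: rest) then [] :: pvSplit (rest.drop 1)
    else (pvSplit rest).modifyHead (c :: ·)
termination_by l => l.length
decreasing_by
  all_goals simp

theorem pvSplit_ne_nil (l : List Char) : pvSplit l ≠ [] := by
  induction l using pvSplit.induct with
  | case1 => simp [pvSplit]
  | case2 c rest h ih => simp [pvSplit, h]
  | case3 c rest h ih =>
    cases hs : pvSplit rest with
    | nil => exact absurd hs ih
    | cons a t => simp [pvSplit, h, hs]

theorem pvModifyHead_id (xs : List (List Char)) :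
    xs.modifyHead (fun y => y) = xs := by
  cases xs <;> simp

theorem pvGo_eq (fuel : Nat) (l cur : List Char) (acc : List (List Char))
    (h : l.length < fuel) :
    PySem.Chars.splitOn.go ['-', '>'] fuel l cur acc
      = acc.reverse ++ (pvSplit l).modifyHead (cur.reverse ++ ·) := by
  induction fuel generalizing l cur acc with
  | zero => omega
  | succ fuel ih =>
    cases l with
    | nil => simp [PySem.Chars.splitOn.go, pvSplit]
    | cons c rest =>
      by_cases hp : List.isPrefixOf ['-', '>'] (c :: rest)
      · rw [show PySem.Chars.splitOn.go ['-', '>'] (fuel + 1) (c :: rest) cur acc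
              = PySem.Chars.splitOn.go ['-', '>'] fuel (List.drop 2 (c :: rest)) [] (cur.reverse :: acc) by
            simp [PySem.Chars.splitOn.go, hp]]
        rw [ih (List.drop 2 (c :: rest)) [] (cur.reverse :: acc)
            (by simp at h ⊢; omega)]
        rw [show pvSplit (c :: rest) = [] :: pvSplit (rest.drop 1) by simp [pvSplit, hp]]
        simp [pvModifyHead_id]
      · rw [show PySem.Chars.splitOn.go ['-', '>'] (fuel + 1) (c :: rest) cur acc
              = PySem.Chars.splitOn.go ['-', '>'] fuel rest (c :: cur) acc by
            simp [PySem.Chars.splitOn.go, hp]]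
        rw [ih rest (c :: cur) acc (by simp at h ⊢; omega)]
        rw [show pvSplit (c :: rest) = (pvSplit rest).modifyHead (c :: ·) by simp [pvSplit, hp]]
        cases hs : pvSplit rest with
        | nil => exact absurd hs (pvSplit_ne_nil rest)
        | cons a t => simp

theorem pvSplitOn_eq (l : List Char) :
    PySem.Chars.splitOn l ['-', '>'] = pvSplit l := by
  rw [PySem.Chars.splitOn, pvGo_eq (l.length + 1) l [] [] (by omega)]
  simp [pvModifyHead_id]

theorem pvJoin_pvSplit (l : List Char) :
    PySem.Chars.join ['-', '>'] (pvSplit l) = l := by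
  induction l using pvSplit.induct with
  | case1 => simp [pvSplit, PySem.Chars.join_singleton]
  | case2 c rest h ih =>
    obtain ⟨t, ht⟩ := (List.isPrefixOf_iff_prefix.mp h)
    obtain ⟨hc1, hc2⟩ : '-' = c ∧ '>' :: t = rest := by simpa using ht
    subst hc1; subst hc2
    rw [show pvSplit ('-' :: '>' :: t) = [] :: pvSplit t by simp [pvSplit, h]]
    cases hs : pvSplit t with
    | nil => exact absurd hs (pvSplit_ne_nil t)
    | cons a u =>
      rw [PySem.Chars.join_cons_cons]
      simp only [List.drop_succ_cons, List.drop_zero, hs] at ih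
      simp [ih]
  | case3 c rest h ih =>
    rw [show pvSplit (c :: rest) = (pvSplit rest).modifyHead (c :: ·) by simp [pvSplit, h]]
    cases hs : pvSplit rest with
    | nil => exact absurd hs (pvSplit_ne_nil rest)
    | cons a t =>
      rw [hs] at ih
      cases t with
      | nil => simp only [List.modifyHead_cons, PySem.Chars.join_singleton] at ih ⊢; simp [ih]
      | cons b u =>
        rw [PySem.Chars.join_cons_cons] at ih
        simp [List.modifyHead_cons, PySem.Chars.join_cons_cons, ih.symm]

theorem pvSplit_head_prefix (l : List Char) :
    ∃ hd tl, pvSplit l = hd :: tl ∧ hd <+: l := by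
  induction l using pvSplit.induct with
  | case1 => exact ⟨[], [], by simp [pvSplit], List.nil_prefix⟩
  | case2 c rest h ih =>
    exact ⟨[], pvSplit (rest.drop 1), by simp [pvSplit, h], List.nil_prefix⟩
  | case3 c rest h ih =>
    obtain ⟨hd, tl, hs, hpre⟩ := ih
    exact ⟨c :: hd, tl, by simp [pvSplit, h, hs], List.cons_prefix_cons.mpr ⟨rfl, hpre⟩⟩

theorem pvSplit_arrowFree (l : List Char) :
    ∀ p ∈ pvSplit l, ¬ (['-', '>'] <:+: p) := by
  induction l using pvSplit.induct with
  | case1 =>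
    intro p hp
    simp [pvSplit] at hp
    subst hp; simp
  | case2 c rest h ih =>
    intro p hp
    rw [show pvSplit (c :: rest) = [] :: pvSplit (rest.drop 1) by simp [pvSplit, h]] at hp
    rcases List.mem_cons.mp hp with rfl | hp'
    · simp
    · exact ih p hp'
  | case3 c rest h ih =>
    intro p hp
    obtain ⟨hd, tl, hs, hpre⟩ := pvSplit_head_prefix rest
    rw [show pvSplit (c :: rest) = (pvSplit rest).modifyHead (c :: ·) by simp [pvSplit, h],
        hs, List.modifyHead_cons] at hp
    rcases List.mem_cons.mp hp with rfl | hp'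
    · intro hinf
      rcases List.infix_cons_iff.mp hinf with hpre2 | hinf2
      · obtain ⟨hc, h2⟩ := List.cons_prefix_cons.mp hpre2
        exact h (List.isPrefixOf_iff_prefix.mpr
          (List.cons_prefix_cons.mpr ⟨hc, h2.trans hpre⟩))
      · exact ih hd (by rw [hs]; exact List.mem_cons_self) hinf2
    · exact ih p (by rw [hs]; exact List.mem_cons_of_mem _ hp')

-- abstract boundary search both loops compute
def pvBal (p : List Char) : Int :=
  (PySem.Chars.count p ['('] : Int) - (PySem.Chars.count p [')'] : Int)

def pvFind (depth : Int) : List (List Char) → Option Nat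
  | p :: q :: rest =>
    let d' := depth + pvBal p
    if d' = 0 then some 0 else (pvFind d' (q :: rest)).map (· + 1)
  | _ => none

theorem pvCountGo_single (a : Char) (fuel : Nat) (l : List Char) (acc : Nat)
    (h : l.length ≤ fuel) :
    PySem.Chars.count.go [a] fuel l acc = acc + l.count a := by
  induction fuel generalizing l acc with
  | zero =>
    cases l with
    | nil => simp [PySem.Chars.count.go]
    | cons c rest => simp at h
  | succ fuel ih =>
    cases l with
    | nil => simp [PySem.Chars.count.go]
    | cons c rest =>
      by_cases hp : List.isPrefixOf [a] (c :: rest)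
      · have hac : a = c := by
          obtain ⟨t, ht⟩ := List.isPrefixOf_iff_prefix.mp hp
          cases ht; simp_all
        subst hac
        rw [show PySem.Chars.count.go [a] (fuel + 1) (a :: rest) acc
              = PySem.Chars.count.go [a] fuel (List.drop 1 (a :: rest)) (acc + 1) by
            simp [PySem.Chars.count.go, hp]]
        simp only [List.drop_succ_cons, List.drop_zero]
        rw [ih rest (acc + 1) (by simp at h; omega)]
        simp
        omega
      · have hac : a ≠ c := by
          intro hh; subst hh; exact hp (by simp [List.isPrefixOf])
        rw [show PySem.Chars.count.go [a] (fuel + 1) (c :: rest) acc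
              = PySem.Chars.count.go [a] fuel rest acc by
            simp [PySem.Chars.count.go, hp]]
        rw [ih rest acc (by simp at h; omega)]
        simp [hac.symm]

theorem pvCount_single (s : List Char) (a : Char) :
    PySem.Chars.count s [a] = s.count a := by
  rw [PySem.Chars.count]
  simp [pvCountGo_single a s.length s 0 (le_refl _)]

theorem pvBal_cons (c : Char) (p : List Char) :
    pvBal (c :: p) = (if c = '(' then 1 else if c = ')' then -1 else 0) + pvBal p := by
  simp only [pvBal, pvCount_single, List.count_cons]
  split_ifs with h1 h2 <;> simp_all <;> try ring

theorem pvLoopB_eq (acc : List (List Char)) (depth : Int) (pieces : List (List Char)) :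
    pvLoopB acc depth pieces
      = match pvFind depth pieces with
        | none => (none, none)
        | some j =>
          (some (String.ofList (PySem.Chars.strip (PySem.Chars.join ['-', '>'] (acc ++ pieces.take (j + 1))))),
           some (String.ofList (PySem.Chars.strip (PySem.Chars.join ['-', '>'] (pieces.drop (j + 1)))))) := by
  induction pieces generalizing acc depth with
  | nil => simp [pvLoopB, pvFind]
  | cons p tl ih =>
    cases tl with
    | nil => simp [pvLoopB, pvFind]
    | cons q rest =>
      have e : depth + (PySem.Chars.count p ['('] : Int) - (PySem.Chars.count p [')'] : Int)
          = depth + pvBal p := by unfold pvBal; ring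
      rw [pvLoopB, pvFind]
      simp only [e]
      by_cases hd : depth + pvBal p = 0
      · simp [hd]
      · rw [if_neg hd, if_neg hd, ih (acc ++ [p]) (depth + pvBal p)]
        cases pvFind (depth + pvBal p) (q :: rest) with
        | none => rfl
        | some j => simp [List.take_succ_cons, List.drop_succ_cons]

theorem pvLoopA_arrowFree (p : List Char) (pre : List Char) (depth : Int)
    (hp : ¬ (['-', '>'] <:+: p)) : pvLoopA pre depth p = none := by
  revert hp
  induction p generalizing pre depth with
  | nil => intro hp; simp [pvLoopA]
  | cons c tl ih =>
    intro hp
    cases tl with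
    | nil => simp [pvLoopA]
    | cons d rest =>
      have htl : ¬ (['-', '>'] <:+: (d :: rest)) :=
        fun hi => hp (List.infix_cons_iff.mpr (Or.inr hi))
      rw [pvLoopA]
      split_ifs with h1 h2 h3 h4
      · exact ih _ _ htl
      · exact ih _ _ htl
      · exact absurd (List.infix_cons_iff.mpr
          (Or.inl ⟨rest, by simp [h3.1, h3.2]⟩)) hp
      · exact ih _ _ htl
      · exact ih _ _ htl

theorem pvLoopA_piece (p rest pre : List Char) (depth : Int)
    (hp : ¬ (['-', '>'] <:+: p)) :
    pvLoopA pre depth (p ++ '-' :: '>' :: rest)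
      = if depth + pvBal p = 0 then some (pre ++ p, rest)
        else pvLoopA (pre ++ p ++ ['-']) (depth + pvBal p) ('>' :: rest) := by
  revert hp
  induction p generalizing pre depth with
  | nil =>
    intro hp
    have hb : pvBal ([] : List Char) = 0 := by simp [pvBal, pvCount_single]
    simp only [List.nil_append, hb, add_zero]
    rw [pvLoopA]
    simp
  | cons c tl ih =>
    intro hp
    have htl : ¬ (['-', '>'] <:+: tl) :=
      fun hi => hp (List.infix_cons_iff.mpr (Or.inr hi))
    rcases hl : tl ++ '-' :: '>' :: rest with _ | ⟨d, l'⟩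
    · simp at hl
    have hbc := pvBal_cons c tl
    by_cases h1 : c = '('
    · rw [List.cons_append, hl, pvLoopA, if_pos h1, ← hl, ih _ _ htl]
      rw [show depth + pvBal (c :: tl) = depth + 1 + pvBal tl from by
        rw [hbc, if_pos h1]; ring]
      by_cases h0 : depth + 1 + pvBal tl = 0
      · rw [if_pos h0, if_pos h0]; simp
      · rw [if_neg h0, if_neg h0]; simp
    · by_cases h2 : c = ')'
      · rw [List.cons_append, hl, pvLoopA, if_neg h1, if_pos h2, ← hl, ih _ _ htl]
        rw [show depth + pvBal (c :: tl) = depth - 1 + pvBal tl from by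
          rw [hbc, if_neg h1, if_pos h2]; ring]
        by_cases h0 : depth - 1 + pvBal tl = 0
        · rw [if_pos h0, if_pos h0]; simp
        · rw [if_neg h0, if_neg h0]; simp
      · by_cases h3 : c = '-' ∧ d = '>'
        · -- the separator would start inside the arrow-free p: impossible
          exfalso
          cases tl with
          | nil => simp at hl; simp [← hl.1] at h3
          | cons e tl' =>
            simp only [List.cons_append, List.cons.injEq] at hl
            exact hp (List.infix_cons_iff.mpr (Or.inl ⟨tl', by simp [h3.1]; exact (hl.1.trans h3.2).symm⟩))
        · rw [List.cons_append, hl, pvLoopA, if_neg h1, if_neg h2, if_neg h3, ← hl, ih _ _ htl]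
          rw [show depth + pvBal (c :: tl) = depth + pvBal tl from by
            rw [hbc, if_neg h1, if_neg h2]; ring]
          by_cases h0 : depth + pvBal tl = 0
          · rw [if_pos h0, if_pos h0]; simp
          · rw [if_neg h0, if_neg h0]; simp

theorem pvLoopA_eq (pieces : List (List Char)) (pre : List Char) (depth : Int)
    (hfree : ∀ p ∈ pieces, ¬ (['-', '>'] <:+: p)) (hne : pieces ≠ []) :
    pvLoopA pre depth (PySem.Chars.join ['-', '>'] pieces)
      = (pvFind depth pieces).map
          (fun j => (pre ++ PySem.Chars.join ['-', '>'] (pieces.take (j + 1)),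
                     PySem.Chars.join ['-', '>'] (pieces.drop (j + 1)))) := by
  induction pieces generalizing pre depth with
  | nil => exact absurd rfl hne
  | cons p tl ih =>
    cases tl with
    | nil =>
      rw [PySem.Chars.join_singleton, pvLoopA_arrowFree p pre depth (hfree p (by simp))]
      simp [pvFind]
    | cons q rest =>
      rw [PySem.Chars.join_cons_cons,
          show p ++ ['-', '>'] ++ PySem.Chars.join ['-', '>'] (q :: rest)
             = p ++ '-' :: '>' :: PySem.Chars.join ['-', '>'] (q :: rest) by simp,
          pvLoopA_piece p _ pre depth (hfree p (by simp)), pvFind]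
      by_cases hd : depth + pvBal p = 0
      · simp [hd, PySem.Chars.join_singleton]
      · rw [if_neg hd, if_neg hd]
        rcases hj : PySem.Chars.join ['-', '>'] (q :: rest) with _ | ⟨x, xs⟩
        · -- the join of the remaining pieces is empty: q = [] and rest = []
          have hq : q = [] ∧ rest = [] := by
            cases rest with
            | nil => simpa [PySem.Chars.join_singleton] using hj
            | cons r rs =>
              rw [PySem.Chars.join_cons_cons] at hj
              simp at hj
          obtain ⟨rfl, rfl⟩ := hq
          rw [show pvLoopA (pre ++ p ++ ['-']) (depth + pvBal p) ['>'] = none by simp [pvLoopA]]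
          simp [pvFind]
        · rw [show pvLoopA (pre ++ p ++ ['-']) (depth + pvBal p) ('>' :: x :: xs)
                = pvLoopA (pre ++ p ++ ['-'] ++ ['>']) (depth + pvBal p) (x :: xs) by
              rw [pvLoopA]; simp]
          rw [← hj, ih _ _ (fun r hr => hfree r (by simp [hr])) (by simp)]
          cases hf : pvFind (depth + pvBal p) (q :: rest) with
          | none => rfl
          | some j =>
            simp only [Option.map_some, List.take_succ_cons, List.drop_succ_cons]
            rw [PySem.Chars.join_cons_cons]
            simp [List.append_assoc]

-- ===== VERDICT (by name: the statement is the Claim_ definition above) =====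
theorem find_main_implication_spec : Claim_equal_find_main_implication := by
  intro formula _
  unfold Spec_find_main_implication find_main_implication find_main_implication_alt
  set f := PySem.Chars.strip formula.toList with hf
  by_cases hin : PySem.Chars.isIn ['-', '>'] f = false
  · simp [hin]
  · rw [if_neg hin, if_neg hin, pvSplitOn_eq, pvLoopB_eq]
    have hA : pvLoopA [] 0 f
        = (pvFind 0 (pvSplit f)).map
            (fun j => ([] ++ PySem.Chars.join ['-', '>'] ((pvSplit f).take (j + 1)),
                       PySem.Chars.join ['-', '>'] ((pvSplit f).drop (j + 1)))) := by
      conv_lhs => rw [← pvJoin_pvSplit f]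
      exact pvLoopA_eq (pvSplit f) [] 0 (pvSplit_arrowFree f) (pvSplit_ne_nil f)
    rw [hA]
    cases pvFind 0 (pvSplit f) with
    | none => rfl
    | some j => simp
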